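-- pv_equiv track=rewrite | github.com/gemmatruong/CECS277-Lab03 | Lab03/lab03.py | get_letters_remaining
-- ===== SOURCE A (Python) =====
-- def get_letters_remaining(incorrect, correct):
--     """ Create a list of remaining letters in the alphabet to choose from
--         Input: incorrect - a list of incorrect letters
--                correct - a list of correct letters
--         Output: a list of remaining letters
--     """
--     remaining = ['A', 'B', 'C', 'D', 'E', 'F', 'G', 'H', 'I', 'J', 'K', 'L',
--                  'M', 'N', 'O', 'P', 'Q', 'R', 'S', 'T', 'U', 'V', 'W', 'X', 'Y',
--                  'Z']
--
--     for letter in remaining[:]: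
--         if letter in incorrect or letter in correct:
--             remaining.remove(letter)
--
--     return remaining
-- ===== SOURCE B (Python) =====
-- ALPHABET = 'ABCDEFGHIJKLMNOPQRSTUVWXYZ'
--
-- def get_letters_remaining(incorrect, correct):
--     """ Create a list of remaining letters in the alphabet to choose from """
--     excluded = set(incorrect) | set(correct)
--     return sorted(set(ALPHABET) - excluded)
-- ===== Notes on version B (the rewrite author's own statement) =====
-- stated objective: idiomatic
-- what changed: Replaces the scan-a-copy-and-list.remove loop with one set difference (alphabet set minus the union of both guess sets) followed by sorted() to restore alphabetical order.
import Mathlib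
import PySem

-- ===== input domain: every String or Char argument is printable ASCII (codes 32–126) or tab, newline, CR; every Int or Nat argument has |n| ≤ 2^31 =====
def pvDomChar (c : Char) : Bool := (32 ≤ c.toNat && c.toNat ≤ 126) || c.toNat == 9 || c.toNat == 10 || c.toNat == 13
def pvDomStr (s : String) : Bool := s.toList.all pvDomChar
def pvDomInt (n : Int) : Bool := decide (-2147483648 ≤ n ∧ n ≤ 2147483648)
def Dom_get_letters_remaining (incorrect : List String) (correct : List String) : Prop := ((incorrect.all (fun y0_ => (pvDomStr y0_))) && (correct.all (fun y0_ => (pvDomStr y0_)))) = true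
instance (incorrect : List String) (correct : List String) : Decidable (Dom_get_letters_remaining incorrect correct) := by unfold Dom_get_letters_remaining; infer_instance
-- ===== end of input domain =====

-- B replaces A's scan-a-copy-and-remove loop by one set difference plus sorted(); identical return value.

def pvAlphabet : List String :=
  ["A", "B", "C", "D", "E", "F", "G", "H", "I", "J", "K", "L",
   "M", "N", "O", "P", "Q", "R", "S", "T", "U", "V", "W", "X", "Y", "Z"]

-- ===== PORT A =====
-- for letter in remaining[:]: if letter in incorrect or letter in correct: remaining.remove(letter)
-- remove? is always 'some' here (each letter is still present when visited); getD keeps the port total.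
def get_letters_remaining (incorrect : List String) (correct : List String) : List String :=
  pvAlphabet.foldl
    (fun remaining letter =>
      if incorrect.contains letter || correct.contains letter then
        (PySem.List.remove? remaining letter).getD remaining
      else remaining)
    pvAlphabet

-- ===== PORT B =====
-- excluded = set(incorrect) | set(correct); return sorted(set(ALPHABET) - excluded)
def get_letters_remaining_alt (incorrect : List String) (correct : List String) : List String :=
  PySem.List.sorted
    (PySem.Set.diff (PySem.Set.ofList pvAlphabet)
      (PySem.Set.union (PySem.Set.ofList incorrect) correct))
    (fun x => x) false

-- ===== PRECONDITION & SPEC =====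
def Spec_get_letters_remaining (incorrect : List String) (correct : List String) (out : List String) : Prop := out = get_letters_remaining_alt incorrect correct
instance (incorrect : List String) (correct : List String) (out : List String) : Decidable (Spec_get_letters_remaining incorrect correct out) := by unfold Spec_get_letters_remaining; infer_instance

-- ===== CLAIM (what is proved, stated in full; the proofs are below) =====
def Claim_equal_get_letters_remaining : Prop := ∀ (incorrect : List String) (correct : List String), Dom_get_letters_remaining incorrect correct → Spec_get_letters_remaining incorrect correct (get_letters_remaining incorrect correct)

-- ===== LEMMAS AND PROOFS =====

-- remove? keyed past a prefix that does not contain the key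
theorem pv_remove_append {α : Type} [BEq α] [LawfulBEq α] (keep : List α) (x : α) (rest : List α)
    (hx : x ∉ keep) : PySem.List.remove? (keep ++ x :: rest) x = some (keep ++ rest) := by
  induction keep with
  | nil => simp [PySem.List.remove?_cons_self]
  | cons k ks ih =>
    have hk : k ≠ x := fun h => hx (by simp [h])
    have hxks : x ∉ ks := fun h => hx (List.mem_cons_of_mem _ h)
    simp [PySem.List.remove?_cons_of_ne _ hk, ih hxks]

-- the loop invariant for A: processing todo over (keep ++ todo) filters todo in place
theorem pv_loopA (q : String → Bool) (todo : List String) (keep : List String)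
    (hnd : todo.Nodup) (hdisj : ∀ l ∈ todo, l ∉ keep) :
    todo.foldl
      (fun remaining letter =>
        if q letter then (PySem.List.remove? remaining letter).getD remaining
        else remaining)
      (keep ++ todo)
    = keep ++ todo.filter (fun l => !q l) := by
  induction todo generalizing keep with
  | nil => simp
  | cons x rest ih =>
    rcases List.nodup_cons.mp hnd with ⟨hxr, hndr⟩
    by_cases hq : q x
    · have : PySem.List.remove? (keep ++ x :: rest) x = some (keep ++ rest) :=
        pv_remove_append keep x rest (hdisj x (by simp))
      rw [List.foldl_cons, if_pos hq, this, Option.getD_some,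
        ih keep hndr (fun l hl => hdisj l (List.mem_cons_of_mem _ hl))]
      simp [hq]
    · rw [List.foldl_cons, if_neg hq]
      have hacc : keep ++ x :: rest = (keep ++ [x]) ++ rest := by simp
      rw [hacc, ih (keep ++ [x]) hndr ?_]
      · simp [hq]
      · intro l hl hmem
        rcases List.mem_append.mp hmem with h | h
        · exact hdisj l (List.mem_cons_of_mem _ hl) h
        · have : l = x := by simpa using h
          exact hxr (this ▸ hl)

theorem pv_A_eq_filter (incorrect correct : List String) :
    get_letters_remaining incorrect correct
      = pvAlphabet.filter (fun l => !(incorrect.contains l || correct.contains l)) := by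
  have := pv_loopA (fun l => incorrect.contains l || correct.contains l) pvAlphabet []
    (by decide) (by simp)
  simpa [get_letters_remaining] using this

theorem pv_B_eq_filter (incorrect correct : List String) :
    get_letters_remaining_alt incorrect correct
      = pvAlphabet.filter (fun l => !(incorrect.contains l || correct.contains l)) := by
  unfold get_letters_remaining_alt
  apply PySem.List.sorted_eq_of_perm_of_pairwise_lt
  · apply (List.perm_ext_iff_of_nodup ?_ ?_).mpr
    · intro a
      simp only [List.mem_filter, PySem.Set.mem_diff, PySem.Set.mem_union, PySem.Set.mem_ofList]
      constructor
      · rintro ⟨ha, hnot⟩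
        exact ⟨ha, by simpa using hnot⟩
      · rintro ⟨ha, hb⟩
        exact ⟨ha, by simpa using hb⟩
    · exact List.Nodup.filter _ (by decide)
    · exact PySem.Set.nodup_diff _ _ (PySem.Set.nodup_ofList _)
  · refine List.Pairwise.filter _ ?_
    have h : pvAlphabet.Pairwise (fun a b => a.toList < b.toList) := by decide
    exact h.imp (fun hab => String.lt_iff_toList_lt.mpr hab)

-- ===== VERDICT (by name: the statement is the Claim_ definition above) =====
theorem get_letters_remaining_spec : Claim_equal_get_letters_remaining := by
  intro incorrect correct _
  unfold Spec_get_letters_remaining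
  rw [pv_A_eq_filter, pv_B_eq_filter]
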